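-- pv_equiv track=rewrite | github.com/wyk18703232953/myResearch | codeComplex/data/filteredData/python/linear/python_linear_0494.py | core_algorithm
-- ===== SOURCE A (Python) =====
-- def core_algorithm(a):
--     n = len(a)
--     if n == 0:
--         return []
--     if n == 1:
--         return [1]
--     dp=[[-1 for _ in range(5)] for _ in range(n)]
--     for i in range(1, min(2, n)):
--         if a[i] < a[i-1]:
--             for j in range(5):
--                 ch=-1
--                 for k in range(5):
--                     if k > j:
--                         ch = k
--                 dp[i][j] = ch
--         elif a[i] > a[i-1]:
--             for j in range(5):
--                 ch=-1
--                 for k in range(5):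
--                     if k < j:
--                         ch = k
--                 dp[i][j] = ch
--
--         else:
--             for j in range(5):
--                 ch=-1
--                 for k in range(5):
--                     if k != j:
--                         ch = k
--                 dp[i][j] = ch
--     for i in range(2, n):
--         if a[i] < a[i-1]:
--             for j in range(5):
--                 ch=-1
--                 for k in range(5):
--                     if k > j and dp[i-1][k] != -1:
--                         ch = k
--                 dp[i][j] = ch
--         elif a[i] > a[i-1]:
--             for j in range(5):
--                 ch=-1
--                 for k in range(5):
--                     if k < j and dp[i-1][k] != -1:
--                         ch = k
--                 dp[i][j] = ch
--
--         else:
--             for j in range(5):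
--                 ch=-1
--                 for k in range(5):
--                     if k != j and dp[i-1][k] != -1:
--                         ch = k
--                 dp[i][j] = ch
--     ind=-1
--     for i in range(5):
--         if dp[-1][i] != -1:
--             ind = i
--     if ind == -1:
--         return [-1]
--     res=[ind+1]
--     for i in range(n-1, 0, -1):
--         res.append(dp[i][ind] + 1)
--         ind = dp[i][ind]
--     return res[::-1]
-- ===== SOURCE B (Python) =====
-- def core_algorithm(a):
--     # Interval-automaton reformulation: the set of ranks reachable at each
--     # position is always an interval [lo,hi] possibly minus one interior point,
--     # so the forward pass keeps a 3-int summary per position (no 5x5 scans) and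
--     # the backward pass picks each rank by O(1) interval arithmetic.
--     n = len(a)
--     if n == 0:
--         return []
--     if n == 1:
--         return [1]
--
--     def sign(i):
--         if a[i] < a[i - 1]:
--             return -1
--         if a[i] > a[i - 1]:
--             return 1
--         return 0
--
--     EMPTY = (1, 0, -1)  # lo > hi encodes the empty set
--
--     def base(s):
--         # position 1: every predecessor rank is allowed
--         if s == -1:
--             return (0, 3, -1)
--         if s == 1:
--             return (1, 4, -1)
--         return (0, 4, -1)
--
--     def step(t, s):
--         lo, hi, hole = t
--         if lo > hi:
--             return EMPTY
--         if s == -1: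
--             return (0, hi - 1, -1) if hi > 0 else EMPTY
--         if s == 1:
--             return (lo + 1, 4, -1) if lo < 4 else EMPTY
--         if lo < hi:
--             return (0, 4, -1)
--         if lo == 0:
--             return (1, 4, -1)
--         if lo == 4:
--             return (0, 3, -1)
--         return (0, 4, lo)
--
--     tri = [base(sign(1))]
--     for i in range(2, n):
--         tri.append(step(tri[-1], sign(i)))
--
--     lo, hi, hole = tri[-1]
--     if lo > hi:
--         return [-1]
--
--     def pick(t, s, j):
--         # largest rank related to j inside the summarised set
--         lo, hi, hole = t
--         if s == -1:
--             return hi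
--         if s == 1:
--             c = min(hi, j - 1)
--             return c - 1 if c == hole else c
--         if hi != j:
--             return hi
--         c = hi - 1
--         return c - 1 if c == hole else c
--
--     def pick1(s, j):
--         # position 1: unconstrained predecessor
--         if s == -1:
--             return 4
--         if s == 1:
--             return j - 1
--         return 4 if j != 4 else 3
--
--     j = hi
--     out = [j + 1]
--     for i in range(n - 1, 1, -1):
--         j = pick(tri[i - 2], sign(i), j)
--         out.append(j + 1)
--     out.append(pick1(sign(1), j) + 1)
--     return out[::-1]
-- ===== Notes on version B (the rewrite author's own statement) =====
-- stated objective: faster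
-- what changed: Replaces the 5-wide dp table with its 5x5 inner scans per position by an interval automaton: the reachable rank set is summarised as a 3-int triple (lo, hi, hole) updated and queried by O(1) interval arithmetic, both in the forward pass and in the backward rank reconstruction.
import Mathlib
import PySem

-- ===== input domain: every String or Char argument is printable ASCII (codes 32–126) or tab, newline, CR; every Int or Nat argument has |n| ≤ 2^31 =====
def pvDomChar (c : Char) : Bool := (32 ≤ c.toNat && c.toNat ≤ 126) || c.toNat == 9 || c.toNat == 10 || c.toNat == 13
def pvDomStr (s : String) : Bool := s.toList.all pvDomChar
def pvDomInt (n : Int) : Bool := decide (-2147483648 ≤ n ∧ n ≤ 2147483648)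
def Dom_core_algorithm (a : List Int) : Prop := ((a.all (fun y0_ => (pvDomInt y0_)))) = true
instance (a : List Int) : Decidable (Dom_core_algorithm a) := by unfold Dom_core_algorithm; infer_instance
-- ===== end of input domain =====

-- B replaces A's 5×5-scanning dp table by an interval automaton: the set of reachable ranks at
-- each position is summarised by a 3-int triple (lo, hi, hole) updated and queried in O(1) by
-- interval arithmetic, with no inner loops over ranks (objective: alternative).

-- ===== PORT A =====
-- inner 'ch' loop: ch=-1; for k in range(5): if c(k): ch=k
def pvChLoop (c : Int → Bool) : Int :=
  (PySem.List.pyRange 0 5 1).foldl (fun ch k => if c k then k else ch) (-1)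

-- the 'for j in range(5)' row of the first dp loop (i = 1, no reachability check)
def pvRowA1 (ai aim1 : Int) : List Int :=
  if ai < aim1 then
    (PySem.List.pyRange 0 5 1).map (fun j => pvChLoop (fun k => decide (j < k)))
  else if aim1 < ai then
    (PySem.List.pyRange 0 5 1).map (fun j => pvChLoop (fun k => decide (k < j)))
  else
    (PySem.List.pyRange 0 5 1).map (fun j => pvChLoop (fun k => decide (k ≠ j)))

-- the 'for j in range(5)' row of the second dp loop (i ≥ 2, with 'dp[i-1][k] != -1')
def pvRowA2 (ai aim1 : Int) (dpPrev : List Int) : List Int :=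
  if ai < aim1 then
    (PySem.List.pyRange 0 5 1).map (fun j =>
      pvChLoop (fun k => decide (j < k) && decide (PySem.List.pyGetD dpPrev k 0 ≠ -1)))
  else if aim1 < ai then
    (PySem.List.pyRange 0 5 1).map (fun j =>
      pvChLoop (fun k => decide (k < j) && decide (PySem.List.pyGetD dpPrev k 0 ≠ -1)))
  else
    (PySem.List.pyRange 0 5 1).map (fun j =>
      pvChLoop (fun k => decide (k ≠ j) && decide (PySem.List.pyGetD dpPrev k 0 ≠ -1)))

def core_algorithm (a : List Int) : List Int :=
  let n : Int := PySem.List.len a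
  if n = 0 then []
  else if n = 1 then [1]
  else
    let dp0 : List (List Int) := List.replicate n.toNat (List.replicate 5 (-1))
    let dp1 := (PySem.List.pyRange 1 (min 2 n) 1).foldl
      (fun dp i => PySem.List.pySetD dp i
        (pvRowA1 (PySem.List.pyGetD a i 0) (PySem.List.pyGetD a (i-1) 0))) dp0
    let dp2 := (PySem.List.pyRange 2 n 1).foldl
      (fun dp i => PySem.List.pySetD dp i
        (pvRowA2 (PySem.List.pyGetD a i 0) (PySem.List.pyGetD a (i-1) 0)
          (PySem.List.pyGetD dp (i-1) []))) dp1
    let lastRow := PySem.List.pyGetD dp2 (-1) []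
    let ind := (PySem.List.pyRange 0 5 1).foldl
      (fun ind i => if decide (PySem.List.pyGetD lastRow i 0 ≠ -1) = true then i else ind) (-1)
    if ind = -1 then [-1]
    else
      let st := (PySem.List.pyRange (n-1) 0 (-1)).foldl
        (fun (st : List Int × Int) i =>
          let row := PySem.List.pyGetD dp2 i []
          (st.1 ++ [PySem.List.pyGetD row st.2 0 + 1], PySem.List.pyGetD row st.2 0))
        ([ind + 1], ind)
      -- res[::-1] is List.reverse
      st.1.reverse

-- ===== PORT B =====
-- sign(i): -1 / 1 / 0 for decrease / increase / equal at position i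
def pvSign (a : List Int) (i : Int) : Int :=
  if PySem.List.pyGetD a i 0 < PySem.List.pyGetD a (i-1) 0 then -1
  else if PySem.List.pyGetD a (i-1) 0 < PySem.List.pyGetD a i 0 then 1
  else 0

-- base(s): reachable ranks at position 1 (every predecessor rank allowed)
def pvBase (s : Int) : Int × Int × Int :=
  if s = -1 then (0, 3, -1) else if s = 1 then (1, 4, -1) else (0, 4, -1)

-- step(t, s): image of the summarised set under one transition ((1,0,-1) encodes empty)
def pvStep (t : Int × Int × Int) (s : Int) : Int × Int × Int :=
  if t.2.1 < t.1 then (1, 0, -1)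
  else if s = -1 then (if 0 < t.2.1 then (0, t.2.1 - 1, -1) else (1, 0, -1))
  else if s = 1 then (if t.1 < 4 then (t.1 + 1, 4, -1) else (1, 0, -1))
  else if t.1 < t.2.1 then (0, 4, -1)
  else if t.1 = 0 then (1, 4, -1)
  else if t.1 = 4 then (0, 3, -1)
  else (0, 4, t.1)

-- pick(t, s, j): largest rank related to j inside the summarised set
def pvPick (t : Int × Int × Int) (s j : Int) : Int :=
  if s = -1 then t.2.1
  else if s = 1 then (let c := min t.2.1 (j - 1); if c = t.2.2 then c - 1 else c)
  else if t.2.1 ≠ j then t.2.1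
  else (let c := t.2.1 - 1; if c = t.2.2 then c - 1 else c)

-- pick1(s, j): largest related rank at position 1 (unconstrained predecessor)
def pvPick1 (s j : Int) : Int :=
  if s = -1 then 4 else if s = 1 then j - 1 else if j ≠ 4 then 4 else 3

def core_algorithm_alt (a : List Int) : List Int :=
  let n : Int := PySem.List.len a
  if n = 0 then []
  else if n = 1 then [1]
  else
    let tri := (PySem.List.pyRange 2 n 1).foldl
      (fun tri i => tri ++ [pvStep (PySem.List.pyGetD tri (-1) (1, 0, -1)) (pvSign a i)])
      [pvBase (pvSign a 1)]
    let t := PySem.List.pyGetD tri (-1) (1, 0, -1)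
    if t.2.1 < t.1 then [-1]
    else
      let st := (PySem.List.pyRange (n - 1) 1 (-1)).foldl
        (fun (st : List Int × Int) i =>
          let j := pvPick (PySem.List.pyGetD tri (i - 2) (1, 0, -1)) (pvSign a i) st.2
          (st.1 ++ [j + 1], j))
        ([t.2.1 + 1], t.2.1)
      (st.1 ++ [pvPick1 (pvSign a 1) st.2 + 1]).reverse

-- ===== PRECONDITION & SPEC =====
def Spec_core_algorithm (a : List Int) (out : List Int) : Prop := out = core_algorithm_alt a
instance (a : List Int) (out : List Int) : Decidable (Spec_core_algorithm a out) := by unfold Spec_core_algorithm; infer_instance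

-- ===== CLAIM (what is proved, stated in full; the proofs are below) =====
def Claim_equal_core_algorithm : Prop := ∀ (a : List Int), Dom_core_algorithm a → Spec_core_algorithm a (core_algorithm a)

-- ===== LEMMAS AND PROOFS =====

-- ---------- proof-side definitions ----------

-- the sign-appropriate relation at position i, as a function of the current rank j and candidate k
def pvCnd (a : List Int) (i j k : Int) : Bool :=
  if PySem.List.pyGetD a i 0 < PySem.List.pyGetD a (i-1) 0 then decide (j < k)
  else if PySem.List.pyGetD a (i-1) 0 < PySem.List.pyGetD a i 0 then decide (k < j)
  else decide (k ≠ j)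

-- the same relation abstracted to a sign value
def pvRel (s j k : Int) : Bool :=
  if s = -1 then decide (j < k) else if s = 1 then decide (k < j) else decide (k ≠ j)

-- abstract dp rows: pvRA a i is A's dp[i] (i ≥ 1); row 0 stays the -1 filler
def pvRA (a : List Int) : Nat → List Int
  | 0 => List.replicate 5 (-1)
  | 1 => (PySem.List.pyRange 0 5 1).map (fun j => pvChLoop (fun k => pvCnd a 1 j k))
  | (t+2) => (PySem.List.pyRange 0 5 1).map (fun j =>
      pvChLoop (fun k => pvCnd a ((t:Int)+2) j k &&
        decide (PySem.List.pyGetD (pvRA a (t+1)) k 0 ≠ -1)))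

def pvTblA (a : List Int) (N m : Nat) : List (List Int) :=
  (List.range N).map (fun t => if 1 ≤ t ∧ t < m then pvRA a t else List.replicate 5 (-1))

-- B's abstract triple sequence: pvT a i summarises the reachable ranks at position i
def pvT (a : List Int) : Nat → Int × Int × Int
  | 0 => (1, 0, -1)
  | 1 => pvBase (pvSign a 1)
  | (t+2) => pvStep (pvT a (t+1)) (pvSign a ((t:Int)+2))

-- membership in the set a triple summarises
def pvMemT (t : Int × Int × Int) (k : Int) : Bool := decide (t.1 ≤ k ∧ k ≤ t.2.1 ∧ k ≠ t.2.2)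

-- the closure of the triples reachable from the three base triples
def pvTriples : List (Int × Int × Int) :=
  [(1,0,-1), (0,0,-1), (0,1,-1), (0,2,-1), (0,3,-1), (0,4,-1), (1,4,-1), (2,4,-1), (3,4,-1), (4,4,-1)]

def pvSigns : List Int := [-1, 0, 1]
def pvFive : List Int := [0, 1, 2, 3, 4]

-- ---------- finite facts discharged by decide ----------

lemma pvRange5 : PySem.List.pyRange 0 5 1 = [0, 1, 2, 3, 4] := by decide

lemma pvFive_of_bounds (k : Int) (h0 : 0 ≤ k) (h5 : k < 5) : k ∈ pvFive := by
  simp only [pvFive, List.mem_cons]; omega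

lemma pvSign_mem (a : List Int) (i : Int) : pvSign a i ∈ pvSigns := by
  unfold pvSign pvSigns; split_ifs <;> simp

lemma pvCnd_eq_rel (a : List Int) (i j k : Int) : pvCnd a i j k = pvRel (pvSign a i) j k := by
  unfold pvCnd pvSign pvRel; split_ifs <;> simp_all

lemma pvBaseL : ∀ s ∈ pvSigns, pvBase s ∈ pvTriples ∧
    ∀ j ∈ pvFive, pvMemT (pvBase s) j = decide (pvChLoop (fun k => pvRel s j k) ≠ -1) := by
  decide

lemma pvStepL : ∀ t ∈ pvTriples, ∀ s ∈ pvSigns, pvStep t s ∈ pvTriples ∧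
    ∀ j ∈ pvFive, pvMemT (pvStep t s) j =
      decide (pvChLoop (fun k => pvRel s j k && pvMemT t k) ≠ -1) := by
  decide

lemma pvPickL : ∀ t ∈ pvTriples, ∀ s ∈ pvSigns, ∀ j ∈ pvFive,
    pvChLoop (fun k => pvRel s j k && pvMemT t k) ≠ -1 →
    pvPick t s j = pvChLoop (fun k => pvRel s j k && pvMemT t k) := by
  decide

lemma pvPick1L : ∀ s ∈ pvSigns, ∀ j ∈ pvFive,
    pvChLoop (fun k => pvRel s j k) ≠ -1 → pvPick1 s j = pvChLoop (fun k => pvRel s j k) := by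
  decide

-- A's last-match scan over a triple's member test returns -1 on empty, else the hi endpoint
lemma pvSelL : ∀ t ∈ pvTriples,
    pvChLoop (fun k => pvMemT t k) = (if t.2.1 < t.1 then -1 else t.2.1) ∧
    (¬ t.2.1 < t.1 → 0 ≤ t.2.1 ∧ t.2.1 < 5 ∧ pvMemT t t.2.1 = true) := by
  decide

-- ---------- pointwise facts about pvChLoop ----------

lemma pvChLoop_sat (c : Int → Bool) (h : pvChLoop c ≠ -1) :
    0 ≤ pvChLoop c ∧ pvChLoop c < 5 ∧ c (pvChLoop c) = true := by
  cases h0 : c 0 <;> cases h1 : c 1 <;> cases h2 : c 2 <;> cases h3 : c 3 <;> cases h4 : c 4 <;>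
    simp_all [pvChLoop, pvRange5, List.foldl]

lemma pvChLoop_congr5 (c c' : Int → Bool) (h : ∀ k, 0 ≤ k → k < 5 → c k = c' k) :
    pvChLoop c = pvChLoop c' := by
  simp only [pvChLoop, pvRange5, List.foldl]
  rw [h 0 (by norm_num) (by norm_num), h 1 (by norm_num) (by norm_num),
    h 2 (by norm_num) (by norm_num), h 3 (by norm_num) (by norm_num),
    h 4 (by norm_num) (by norm_num)]

-- ---------- rows ----------

lemma pvRA_length (a : List Int) (i : Nat) : (pvRA a i).length = 5 := by
  match i with
  | 0 => simp [pvRA]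
  | 1 => simp [pvRA, pvRange5]
  | (t+2) => simp [pvRA, pvRange5]

lemma pvRA_entry1 (a : List Int) (j : Int) (h0 : 0 ≤ j) (h5 : j < 5) :
    PySem.List.pyGetD (pvRA a 1) j 0 = pvChLoop (fun k => pvCnd a 1 j k) := by
  rw [PySem.List.pyGetD_eq_getElem _ 0 h0 (by simp [pvRA_length]; omega)]
  show ((PySem.List.pyRange 0 5 1).map _)[j.toNat]'_ = _
  rw [List.getElem_map, PySem.List.getElem_pyRange_one, Int.toNat_of_nonneg h0]
  norm_num

lemma pvRA_entry2 (a : List Int) (t : Nat) (j : Int) (h0 : 0 ≤ j) (h5 : j < 5) :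
    PySem.List.pyGetD (pvRA a (t+2)) j 0 =
      pvChLoop (fun k => pvCnd a ((t:Int)+2) j k &&
        decide (PySem.List.pyGetD (pvRA a (t+1)) k 0 ≠ -1)) := by
  rw [PySem.List.pyGetD_eq_getElem _ 0 h0 (by simp [pvRA_length]; omega)]
  show ((PySem.List.pyRange 0 5 1).map _)[j.toNat]'_ = _
  rw [List.getElem_map, PySem.List.getElem_pyRange_one, Int.toNat_of_nonneg h0]
  norm_num

lemma pvRowA1_eq (a : List Int) :
    pvRowA1 (PySem.List.pyGetD a 1 0) (PySem.List.pyGetD a (1-1) 0) = pvRA a 1 := by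
  show pvRowA1 _ _ = (PySem.List.pyRange 0 5 1).map (fun j => pvChLoop (fun k => pvCnd a 1 j k))
  unfold pvRowA1 pvCnd
  have h0 : ((1:Int)-1) = 0 := by norm_num
  rw [h0]
  split_ifs <;> rfl

lemma pvRowA2_eq (a : List Int) (t : Nat) :
    pvRowA2 (PySem.List.pyGetD a ((t:Int)+2) 0) (PySem.List.pyGetD a ((t:Int)+2-1) 0)
        (pvRA a (t+1)) = pvRA a (t+2) := by
  show pvRowA2 _ _ _ = (PySem.List.pyRange 0 5 1).map (fun j =>
      pvChLoop (fun k => pvCnd a ((t:Int)+2) j k &&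
        decide (PySem.List.pyGetD (pvRA a (t+1)) k 0 ≠ -1)))
  unfold pvRowA2 pvCnd
  have h1 : ((t:Int)+2-1) = (t:Int)+1 := by ring
  rw [h1]
  split_ifs <;> rfl

-- ---------- the invariant: pvT summarises exactly the non-(-1) entries of pvRA ----------

lemma pvInv (a : List Int) : ∀ i : Nat, 1 ≤ i → pvT a i ∈ pvTriples ∧
    ∀ j ∈ pvFive, pvMemT (pvT a i) j = decide (PySem.List.pyGetD (pvRA a i) j 0 ≠ -1) := by
  intro i
  induction i with
  | zero => omega
  | succ m ih =>
    intro _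
    cases m with
    | zero =>
      refine ⟨(pvBaseL _ (pvSign_mem a 1)).1, ?_⟩
      intro j hj
      have hb : 0 ≤ j ∧ j < 5 := by
        simp only [pvFive, List.mem_cons, List.not_mem_nil, or_false] at hj
        omega
      rw [show pvT a 1 = pvBase (pvSign a 1) from rfl, (pvBaseL _ (pvSign_mem a 1)).2 j hj,
        pvRA_entry1 a j hb.1 hb.2,
        pvChLoop_congr5 (fun k => pvCnd a 1 j k) (fun k => pvRel (pvSign a 1) j k)
          (fun k _ _ => pvCnd_eq_rel a 1 j k)]
    | succ t =>
      have ihh := ih (by omega)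
      refine ⟨(pvStepL _ ihh.1 _ (pvSign_mem a ((t:Int)+2))).1, ?_⟩
      intro j hj
      have hb : 0 ≤ j ∧ j < 5 := by
        simp only [pvFive, List.mem_cons, List.not_mem_nil, or_false] at hj
        omega
      rw [show pvT a (t+2) = pvStep (pvT a (t+1)) (pvSign a ((t:Int)+2)) from rfl,
        (pvStepL _ ihh.1 _ (pvSign_mem a ((t:Int)+2))).2 j hj,
        pvRA_entry2 a t j hb.1 hb.2]
      congr 1
      rw [pvChLoop_congr5 (fun k => pvRel (pvSign a ((t:Int)+2)) j k && pvMemT (pvT a (t+1)) k)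
        (fun k => pvCnd a ((t:Int)+2) j k && decide (PySem.List.pyGetD (pvRA a (t+1)) k 0 ≠ -1))
        (fun k hk0 hk5 => by
          beta_reduce
          rw [pvCnd_eq_rel, ihh.2 k (pvFive_of_bounds k hk0 hk5)])]

-- ---------- forward pass, A side ----------

lemma pvTblA_length (a : List Int) (N m : Nat) : (pvTblA a N m).length = N := by
  simp [pvTblA]

lemma pvTblA_set (a : List Int) (N m : Nat) (hm1 : 1 ≤ m) (hmN : m < N) :
    (pvTblA a N m).set m (pvRA a m) = pvTblA a N (m+1) := by
  apply List.ext_getElem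
  · simp [pvTblA]
  intro t ht1 htl
  have htN : t < N := by simpa [pvTblA] using htl
  rw [List.getElem_set]
  simp only [pvTblA, List.getElem_map, List.getElem_range]
  by_cases hq : m = t
  · subst hq
    rw [if_pos rfl, if_pos ⟨by omega, by omega⟩]
  · rw [if_neg hq]
    by_cases hc : 1 ≤ t ∧ t < m
    · rw [if_pos hc, if_pos ⟨by omega, by omega⟩]
    · rw [if_neg hc, if_neg (by omega)]

lemma pvDp1_eq (a : List Int) (N : Nat) (hN : N = a.length) (h2 : 2 ≤ N) :
    (PySem.List.pyRange 1 (min 2 ((N:Nat):Int)) 1).foldl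
      (fun dp i => PySem.List.pySetD dp i
        (pvRowA1 (PySem.List.pyGetD a i 0) (PySem.List.pyGetD a (i-1) 0)))
      (List.replicate ((N:Nat):Int).toNat (List.replicate 5 (-1)))
    = pvTblA a N 2 := by
  have hmin : min 2 ((N:Nat):Int) = 2 := by omega
  have hr : PySem.List.pyRange 1 2 1 = [1] := by decide
  have hlen : ((N:Nat):Int).toNat = N := by omega
  rw [hmin, hr, hlen]
  simp only [List.foldl_cons, List.foldl_nil]
  rw [pvRowA1_eq, PySem.List.pySetD_of_nonneg _ _ (by norm_num)]
  have htbl1 : pvTblA a N 1 = List.replicate N (List.replicate 5 (-1)) := by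
    apply List.ext_getElem
    · simp [pvTblA]
    intro t ht1 htl
    simp only [pvTblA, List.getElem_map, List.getElem_range, List.getElem_replicate]
    rw [if_neg (by omega)]
  have : ((1:Int).toNat) = 1 := rfl
  rw [this, ← htbl1, pvTblA_set a N 1 (by omega) (by omega)]

lemma pvFoldA (a : List Int) (N : Nat) (hN : N = a.length) (h2 : 2 ≤ N) :
    ∀ m : Nat, 2 ≤ m → m ≤ N →
    (PySem.List.pyRange 2 (m:Int) 1).foldl
      (fun dp i => PySem.List.pySetD dp i
        (pvRowA2 (PySem.List.pyGetD a i 0) (PySem.List.pyGetD a (i-1) 0)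
          (PySem.List.pyGetD dp (i-1) []))) (pvTblA a N 2)
    = pvTblA a N m := by
  intro m hm2
  induction m, hm2 using Nat.le_induction with
  | base =>
    intro _
    rw [PySem.List.pyRange_one_eq_nil (by norm_num)]
    rfl
  | succ m hm ih =>
    intro hmN
    have hcast : ((m+1 : Nat) : Int) = (m : Int) + 1 := by push_cast; ring
    rw [hcast, PySem.List.pyRange_one_succ_right (by exact_mod_cast hm), List.foldl_append,
      ih (by omega)]
    simp only [List.foldl_cons, List.foldl_nil]
    have hm1 : ((m : Int) - 1) = ((m-1 : Nat) : Int) := by omega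
    have hprev : PySem.List.pyGetD (pvTblA a N m) ((m:Int)-1) [] = pvRA a (m-1) := by
      rw [hm1, PySem.List.pyGetD_natCast]
      rw [List.getD_eq_getElem _ _ (by simp [pvTblA]; omega)]
      simp only [pvTblA, List.getElem_map, List.getElem_range]
      rw [if_pos ⟨by omega, by omega⟩]
    rw [hprev]
    have ht2 : m - 2 + 1 = m - 1 := by omega
    have ht2' : m - 2 + 2 = m := by omega
    have hcast2 : ((m-2 : Nat) : Int) + 2 = (m : Int) := by omega
    have hrow := pvRowA2_eq a (m-2)
    rw [ht2, ht2', hcast2] at hrow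
    rw [hrow, PySem.List.pySetD_of_nonneg _ _ (by positivity), Int.toNat_natCast,
      pvTblA_set a N m (by omega) (by omega)]

-- ---------- forward pass, B side ----------

lemma pvFoldB (a : List Int) (N : Nat) (hN : N = a.length) (h2 : 2 ≤ N) :
    ∀ m : Nat, 2 ≤ m → m ≤ N →
    (PySem.List.pyRange 2 (m:Int) 1).foldl
      (fun tri i => tri ++ [pvStep (PySem.List.pyGetD tri (-1) (1, 0, -1)) (pvSign a i)])
      [pvBase (pvSign a 1)]
    = (List.range (m-1)).map (fun t => pvT a (t+1)) := by
  intro m hm2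
  induction m, hm2 using Nat.le_induction with
  | base =>
    intro _
    rw [show PySem.List.pyRange 2 ((2:Nat):Int) 1 = [] from
      PySem.List.pyRange_one_eq_nil (by norm_num)]
    simp [List.range_one, pvT]
  | succ m hm ih =>
    intro hmN
    have hcast : ((m+1 : Nat) : Int) = (m : Int) + 1 := by push_cast; ring
    rw [hcast, PySem.List.pyRange_one_succ_right (by exact_mod_cast hm), List.foldl_append,
      ih (by omega)]
    simp only [List.foldl_cons, List.foldl_nil]
    have hne : (List.range (m-1)).map (fun t => pvT a (t+1)) ≠ [] := by
      simp; omega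
    rw [PySem.List.pyGetD_neg_one _ _ hne, List.getLast_eq_getElem]
    simp only [List.getElem_map, List.getElem_range, List.length_map, List.length_range]
    have hstep : pvStep (pvT a (m - 1 - 1 + 1)) (pvSign a (m:Int)) = pvT a m := by
      have : pvT a ((m-2)+2) = pvStep (pvT a ((m-2)+1)) (pvSign a (((m-2:Nat):Int)+2)) := rfl
      rw [show (m:Int) = ((m-2:Nat):Int)+2 from by omega,
        show m - 1 - 1 + 1 = (m-2)+1 from by omega, ← this,
        show m - 2 + 2 = m from by omega]
    rw [hstep, show m + 1 - 1 = (m - 1) + 1 from by omega, List.range_succ, List.map_append]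
    simp only [List.map_cons, List.map_nil]
    rw [show m - 1 + 1 = m from by omega]

-- ---------- table entry lemmas ----------

lemma pvTblA_entry (a : List Int) (N : Nat) (i : Int) (h1 : 1 ≤ i) (hiN : i < (N:Int)) :
    PySem.List.pyGetD (pvTblA a N N) i [] = pvRA a i.toNat := by
  rw [PySem.List.pyGetD_eq_getElem _ [] (by omega) (by rw [pvTblA_length]; omega)]
  simp only [pvTblA, List.getElem_map, List.getElem_range]
  rw [if_pos ⟨by omega, by omega⟩]

lemma pvTriList_entry (a : List Int) (N : Nat) (i : Int) (h1 : 0 ≤ i) (hiN : i < (N:Int) - 1) :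
    PySem.List.pyGetD ((List.range (N-1)).map (fun t => pvT a (t+1))) i (1, 0, -1) =
      pvT a (i.toNat + 1) := by
  rw [PySem.List.pyGetD_eq_getElem _ _ (by omega)
    (by simp only [List.length_map, List.length_range]; omega)]
  simp only [List.getElem_map, List.getElem_range]

-- ---------- backward pass ----------

lemma pvBack (a : List Int) (N : Nat) (hN : N = a.length) (h2 : 2 ≤ N) :
    ∀ m : Nat, 1 ≤ m → m ≤ N - 1 → ∀ (ind : Int) (out : List Int),
    0 ≤ ind → ind < 5 → PySem.List.pyGetD (pvRA a m) ind 0 ≠ -1 →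
    ((PySem.List.pyRange (m:Int) 0 (-1)).foldl
        (fun (st : List Int × Int) i =>
          (st.1 ++ [PySem.List.pyGetD (PySem.List.pyGetD (pvTblA a N N) i []) st.2 0 + 1],
           PySem.List.pyGetD (PySem.List.pyGetD (pvTblA a N N) i []) st.2 0))
        (out, ind)).1
    = (let stb := (PySem.List.pyRange (m:Int) 1 (-1)).foldl
          (fun (st : List Int × Int) i =>
            (st.1 ++ [pvPick (PySem.List.pyGetD
                ((List.range (N-1)).map (fun t => pvT a (t+1))) (i - 2) (1, 0, -1))
                (pvSign a i) st.2 + 1],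
             pvPick (PySem.List.pyGetD
                ((List.range (N-1)).map (fun t => pvT a (t+1))) (i - 2) (1, 0, -1))
                (pvSign a i) st.2))
          (out, ind);
        stb.1 ++ [pvPick1 (pvSign a 1) stb.2 + 1]) := by
  intro m hm1
  induction m, hm1 using Nat.le_induction with
  | base =>
    intro _ ind out h0 h5 hreach
    rw [show PySem.List.pyRange ((1:Nat):Int) 0 (-1) = [1] from by decide,
        show PySem.List.pyRange ((1:Nat):Int) 1 (-1) = [] from by decide]
    simp only [List.foldl_cons, List.foldl_nil]
    have hcc : pvChLoop (fun k => pvCnd a 1 ind k) =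
        pvChLoop (fun k => pvRel (pvSign a 1) ind k) :=
      pvChLoop_congr5 _ _ (fun k _ _ => by rw [pvCnd_eq_rel])
    rw [pvRA_entry1 a ind h0 h5, hcc] at hreach
    rw [pvTblA_entry a N 1 (by norm_num) (by omega), show (1:Int).toNat = 1 from rfl,
      pvRA_entry1 a ind h0 h5, hcc,
      pvPick1L _ (pvSign_mem a 1) ind (pvFive_of_bounds ind h0 h5) hreach]
  | succ m hm ih =>
    intro hmN ind out h0 h5 hreach
    have hc1 : ((m+1 : Nat) : Int) = (m:Int) + 1 := by push_cast; ring
    rw [hc1, PySem.List.pyRange_neg_one_cons (by omega : (0:Int) < (m:Int)+1),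
        PySem.List.pyRange_neg_one_cons (by omega : (1:Int) < (m:Int)+1)]
    simp only [List.foldl_cons]
    rw [show (m:Int) + 1 - 1 = (m:Int) from by ring]
    have hrowA : PySem.List.pyGetD (pvTblA a N N) ((m:Int)+1) [] = pvRA a (m+1) := by
      rw [pvTblA_entry a N ((m:Int)+1) (by omega) (by omega)]
      congr 1
    have htri : PySem.List.pyGetD ((List.range (N-1)).map (fun t => pvT a (t+1)))
        ((m:Int)+1-2) (1, 0, -1) = pvT a m := by
      rw [pvTriList_entry a N ((m:Int)+1-2) (by omega) (by omega)]
      congr 1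
      omega
    have hinv := pvInv a m (by omega)
    have hentry : PySem.List.pyGetD (pvRA a (m+1)) ind 0 =
        pvChLoop (fun k => pvRel (pvSign a ((m:Int)+1)) ind k && pvMemT (pvT a m) k) := by
      have h := pvRA_entry2 a (m-1) ind h0 h5
      rw [show m - 1 + 2 = m + 1 from by omega, show m - 1 + 1 = m from by omega,
        show ((m-1 : Nat) : Int) + 2 = (m:Int) + 1 from by omega] at h
      rw [h]
      exact pvChLoop_congr5 _ _ (fun k hk0 hk5 => by
        rw [pvCnd_eq_rel, hinv.2 k (pvFive_of_bounds k hk0 hk5)])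
    set v := pvChLoop (fun k => pvRel (pvSign a ((m:Int)+1)) ind k && pvMemT (pvT a m) k)
      with hv
    have hvne : v ≠ -1 := hentry ▸ hreach
    obtain ⟨hv0, hv5, hvsat⟩ := pvChLoop_sat _ hvne
    have hreach' : PySem.List.pyGetD (pvRA a m) v 0 ≠ -1 := by
      simp only [Bool.and_eq_true] at hvsat
      have := hinv.2 v (pvFive_of_bounds v hv0 hv5)
      rw [hvsat.2] at this
      simpa using this.symm
    have hpick : pvPick (pvT a m) (pvSign a ((m:Int)+1)) ind = v :=
      pvPickL _ hinv.1 _ (pvSign_mem a ((m:Int)+1)) ind (pvFive_of_bounds ind h0 h5) hvne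
    rw [hrowA, htri, hentry, hpick]
    exact ih (by omega) v (out ++ [v + 1]) hv0 hv5 hreach'

-- ---------- last entries ----------

lemma pvLastA (a : List Int) (N : Nat) (h2 : 2 ≤ N) :
    PySem.List.pyGetD (pvTblA a N N) (-1) [] = pvRA a (N-1) := by
  rw [PySem.List.pyGetD_neg_one _ _ (by simp [pvTblA]; omega), List.getLast_eq_getElem]
  simp only [pvTblA, List.length_map, List.length_range, List.getElem_map, List.getElem_range]
  rw [if_pos ⟨by omega, by omega⟩]

lemma pvLastB (a : List Int) (N : Nat) (h2 : 2 ≤ N) :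
    PySem.List.pyGetD ((List.range (N-1)).map (fun t => pvT a (t+1))) (-1) (1, 0, -1) =
      pvT a (N-1) := by
  rw [PySem.List.pyGetD_neg_one _ _ (by simp; omega), List.getLast_eq_getElem]
  simp only [List.length_map, List.length_range, List.getElem_map, List.getElem_range]
  rw [show N - 1 - 1 + 1 = N - 1 from by omega]

-- A's final 'ind' scan is the same last-match loop as pvChLoop
lemma pvSelFold (row : List Int) :
    (PySem.List.pyRange 0 5 1).foldl
      (fun ind i => if decide (PySem.List.pyGetD row i 0 ≠ -1) = true then i else ind) (-1)
    = pvChLoop (fun i => decide (PySem.List.pyGetD row i 0 ≠ -1)) := rfl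

-- ===== VERDICT (by name: the statement is the Claim_ definition above) =====
theorem core_algorithm_spec : Claim_equal_core_algorithm := by
  intro a _
  unfold Spec_core_algorithm
  by_cases hl0 : a.length = 0
  · simp [core_algorithm, core_algorithm_alt, PySem.List.len_eq, hl0]
  by_cases hl1 : a.length = 1
  · simp [core_algorithm, core_algorithm_alt, PySem.List.len_eq, hl1]
  have h2 : 2 ≤ a.length := by omega
  have hlen : PySem.List.len a = ((a.length : Nat) : Int) := PySem.List.len_eq a
  have c0 : ¬(((a.length : Nat) : Int) = 0) := by omega
  have c1 : ¬(((a.length : Nat) : Int) = 1) := by omega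
  simp only [core_algorithm, core_algorithm_alt, hlen]
  rw [if_neg c0, if_neg c1, if_neg c0, if_neg c1]
  rw [pvDp1_eq a a.length rfl h2, pvFoldA a a.length rfl h2 a.length h2 le_rfl,
    pvFoldB a a.length rfl h2 a.length h2 le_rfl,
    pvLastA a a.length h2, pvLastB a a.length h2, pvSelFold (pvRA a (a.length - 1))]
  have hinv := pvInv a (a.length - 1) (by omega)
  have hcc : pvChLoop (fun i => decide (PySem.List.pyGetD (pvRA a (a.length - 1)) i 0 ≠ -1))
      = pvChLoop (fun i => pvMemT (pvT a (a.length - 1)) i) :=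
    pvChLoop_congr5 _ _ (fun k hk0 hk5 => (hinv.2 k (pvFive_of_bounds k hk0 hk5)).symm)
  have hsel := pvSelL _ hinv.1
  rw [hcc, hsel.1]
  by_cases hemp : (pvT a (a.length - 1)).2.1 < (pvT a (a.length - 1)).1
  · rw [if_pos hemp, if_pos rfl, if_pos hemp]
  · obtain ⟨hh0, hh5, hhmem⟩ := hsel.2 hemp
    rw [if_neg hemp, if_neg (by omega), if_neg hemp]
    have hreach : PySem.List.pyGetD (pvRA a (a.length - 1)) (pvT a (a.length - 1)).2.1 0 ≠ -1 := by
      have := hinv.2 (pvT a (a.length - 1)).2.1 (pvFive_of_bounds _ hh0 hh5)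
      rw [hhmem] at this
      simpa using this.symm
    have hb := pvBack a a.length rfl h2 (a.length - 1) (by omega) le_rfl
      (pvT a (a.length - 1)).2.1 [(pvT a (a.length - 1)).2.1 + 1] hh0 hh5 hreach
    rw [show ((a.length : Nat) : Int) - 1 = ((a.length - 1 : Nat) : Int) from by omega, hb]
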